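-- pv_equiv track=rewrite | github.com/SebzIO/RAGE-Player-Assist | filehandler/readstorage.py | _find_new_lines
-- ===== SOURCE A (Python) =====
-- def _find_new_lines(previous_lines: list[str], current_lines: list[str]) -> list[str]:
--     """Return only lines not already represented in the previous snapshot."""
--     if not previous_lines:
--         return current_lines
--
--     max_overlap = min(len(previous_lines), len(current_lines))
--     for overlap in range(max_overlap, -1, -1):
--         if overlap == 0:
--             return current_lines
--
--         if previous_lines[-overlap:] == current_lines[:overlap]:
--             return current_lines[overlap:]
--
--     return current_lines
-- ===== SOURCE B (Python) =====
-- def _find_new_lines(previous_lines: list[str], current_lines: list[str]) -> list[str]: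
--     """Return only lines not already represented in the previous snapshot.
--
--     KMP: treat current_lines as the pattern, run its failure automaton over
--     previous_lines; the final state is the longest prefix of current_lines
--     that is a suffix of previous_lines, i.e. the overlap to strip.
--     """
--     cur = current_lines
--     if not cur:
--         return cur
--     m = len(cur)
--     # failure (prefix) function of the pattern
--     pi = [0] * m
--     k = 0
--     for i in range(1, m):
--         while k > 0 and cur[i] != cur[k]:
--             k = pi[k - 1]
--         if cur[i] == cur[k]:
--             k += 1
--         pi[i] = k
--     # run the automaton over the previous snapshot
--     k = 0
--     for x in previous_lines:
--         if k == m: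
--             k = pi[m - 1]
--         while k > 0 and x != cur[k]:
--             k = pi[k - 1]
--         if x == cur[k]:
--             k += 1
--     return cur[k:]
-- ===== Notes on version B (the rewrite author's own statement) =====
-- stated objective: faster
-- what changed: A tries every overlap length from largest to smallest, rebuilding and comparing an O(overlap) slice pair at each step; B builds the KMP failure table of current_lines once and runs its automaton over previous_lines in a single pass, so the longest suffix-of-previous = prefix-of-current overlap is found in linear time with no slice comparisons.
import Mathlib
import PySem

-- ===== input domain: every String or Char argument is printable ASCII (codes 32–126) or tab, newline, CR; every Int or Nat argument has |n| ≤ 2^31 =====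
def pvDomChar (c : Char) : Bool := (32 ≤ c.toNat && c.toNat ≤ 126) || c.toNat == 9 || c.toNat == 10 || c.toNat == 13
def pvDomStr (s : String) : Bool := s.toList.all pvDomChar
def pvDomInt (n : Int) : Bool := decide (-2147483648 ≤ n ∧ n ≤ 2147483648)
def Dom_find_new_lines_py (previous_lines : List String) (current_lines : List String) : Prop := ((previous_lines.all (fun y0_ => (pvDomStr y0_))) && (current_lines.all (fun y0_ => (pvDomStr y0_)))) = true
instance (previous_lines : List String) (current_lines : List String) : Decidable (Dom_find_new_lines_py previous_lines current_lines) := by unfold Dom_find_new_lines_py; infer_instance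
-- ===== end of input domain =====

-- B replaces A's quadratic try-every-overlap slice scan by the KMP failure
-- automaton of current_lines run once over previous_lines (objective: faster,
-- linear time); return values proved identical on all inputs.

-- ===== PORT A =====
-- the 'for overlap in range(max_overlap, -1, -1)' loop with its early returns
def pvAGo (previous_lines : List String) (current_lines : List String) : List Int → List String
  | [] => current_lines
  | o :: rest =>
    if o = 0 then current_lines
    else if PySem.List.slice previous_lines (some (-o)) none
            = PySem.List.slice current_lines none (some o) then
      PySem.List.slice current_lines (some o) none
    else pvAGo previous_lines current_lines rest

def find_new_lines_py (previous_lines : List String) (current_lines : List String) : List String :=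
  if previous_lines = [] then current_lines
  else
    let max_overlap : Int := min (previous_lines.length : Int) (current_lines.length : Int)
    pvAGo previous_lines current_lines (PySem.List.pyRange max_overlap (-1) (-1))

-- ===== PORT B =====
-- 'while k > 0 and x != cur[k]: k = pi[k-1]' — recursion on the strictly
-- decreasing state k ('min … k' only guards termination: the computed pi always
-- has pi[k-1] ≤ k-1, proved below; every index used is in range on the ports'
-- calls, so getD with a junk default is exact there)
def pvFall (c : List String) (pi : List Nat) (x : String) : Nat → Nat
  | 0 => 0
  | (k+1) => if x = c.getD (k+1) "" then k+1
             else pvFall c pi x (min (pi.getD k 0) k)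
termination_by k => k
decreasing_by omega

-- the 'while' followed by 'if x == cur[k]: k += 1'
def pvStep (c : List String) (pi : List Nat) (x : String) (k : Nat) : Nat :=
  let k' := pvFall c pi x k
  if x = c.getD k' "" then k' + 1 else k'

-- 'for i in range(1, m): … pi[i] = k' — pi[i] is written in index order into a
-- preallocated array, so building the list by appending is the same computation
def pvPiLoop (c : List String) : List Nat → (List Nat × Nat) → (List Nat × Nat)
  | [], st => st
  | i :: rest, (pi, k) =>
      let k' := pvStep c pi (c.getD i "") k
      pvPiLoop c rest (pi ++ [k'], k')

-- 'for x in previous_lines: if k == m: k = pi[m-1]; …'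
def pvScanLoop (c : List String) (pi : List Nat) (m : Nat) : List String → Nat → Nat
  | [], k => k
  | x :: rest, k =>
      let k1 := if k = m then pi.getD (m - 1) 0 else k
      pvScanLoop c pi m rest (pvStep c pi x k1)

def find_new_lines_py_alt (previous_lines : List String) (current_lines : List String) : List String :=
  if current_lines = [] then current_lines
  else
    let m := current_lines.length
    let pi := (pvPiLoop current_lines (List.range' 1 (m - 1)) ([0], 0)).1
    let k := pvScanLoop current_lines pi m previous_lines 0
    current_lines.drop k

-- ===== PRECONDITION & SPEC =====
def Spec_find_new_lines_py (previous_lines : List String) (current_lines : List String) (out : List String) : Prop := out = find_new_lines_py_alt previous_lines current_lines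
instance (previous_lines : List String) (current_lines : List String) (out : List String) : Decidable (Spec_find_new_lines_py previous_lines current_lines out) := by unfold Spec_find_new_lines_py; infer_instance

-- ===== CLAIM (what is proved, stated in full; the proofs are below) =====
def Claim_equal_find_new_lines_py : Prop := ∀ (previous_lines : List String) (current_lines : List String), Dom_find_new_lines_py previous_lines current_lines → Spec_find_new_lines_py previous_lines current_lines (find_new_lines_py previous_lines current_lines)

-- ===== LEMMAS AND PROOFS =====

-- ν c t: length of the longest prefix of c (capped at |c|) that is a suffix of t
def pvNu (c t : List String) : Nat :=
  Nat.findGreatest (fun k => c.take k <:+ t) (min c.length t.length)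

-- bord c s: longest proper border of c.take s (longest j < s with take j a suffix of take s)
def pvBord (c : List String) (s : Nat) : Nat :=
  Nat.findGreatest (fun j => c.take j <:+ c.take s) (s - 1)

-- the computed prefix table is correct on every index it has
def pvPiOk (c : List String) (pi : List Nat) : Prop :=
  ∀ j, j < pi.length → pi.getD j 0 = pvBord c (j + 1)

theorem pv_suffix_of_suffix_length_le {l₁ l₂ t : List String}
    (h1 : l₁ <:+ t) (h2 : l₂ <:+ t) (h : l₁.length ≤ l₂.length) : l₁ <:+ l₂ := by
  rw [← List.reverse_prefix] at h1 h2 ⊢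
  exact List.prefix_of_prefix_length_le h1 h2 (by simpa using h)

theorem pv_nu_le (c t : List String) : pvNu c t ≤ min c.length t.length :=
  Nat.findGreatest_le _

theorem pv_nu_sfx (c t : List String) : c.take (pvNu c t) <:+ t := by
  rcases Nat.eq_zero_or_pos (pvNu c t) with h | h
  · rw [h]; exact List.nil_suffix
  · exact Nat.findGreatest_spec (P := fun k => c.take k <:+ t) (Nat.zero_le _) List.nil_suffix

theorem pv_nu_max {c t : List String} {k : Nat} (hk : k ≤ c.length)
    (h : c.take k <:+ t) : k ≤ pvNu c t := by
  refine Nat.le_findGreatest ?_ h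
  have := h.length_le
  rw [List.length_take] at this
  omega

theorem pv_nu_eq_of_iff {c t₁ t₂ : List String}
    (h : ∀ k, k ≤ c.length → (c.take k <:+ t₁ ↔ c.take k <:+ t₂)) :
    pvNu c t₁ = pvNu c t₂ := by
  have b1 : pvNu c t₁ ≤ c.length := le_trans (pv_nu_le c t₁) (min_le_left _ _)
  have b2 : pvNu c t₂ ≤ c.length := le_trans (pv_nu_le c t₂) (min_le_left _ _)
  exact le_antisymm
    (pv_nu_max b1 ((h _ b1).mp (pv_nu_sfx c t₁)))
    (pv_nu_max b2 ((h _ b2).mpr (pv_nu_sfx c t₂)))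

theorem pv_take_suffix_take {c t : List String} {j s : Nat} (hjs : j ≤ s)
    (hj : c.take j <:+ t) (hs : c.take s <:+ t) : c.take j <:+ c.take s :=
  pv_suffix_of_suffix_length_le hj hs
    (by rw [List.length_take, List.length_take]; omega)

theorem pv_nu_take {c : List String} {s : Nat} (hs : s ≤ c.length) :
    pvNu c (c.take s) = s := by
  refine le_antisymm ?_ (pv_nu_max hs (List.suffix_refl _))
  have := pv_nu_le c (c.take s)
  simp [List.length_take] at this
  omega

theorem pv_bord_le (c : List String) (s : Nat) : pvBord c s ≤ s - 1 :=
  Nat.findGreatest_le _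

theorem pv_bord_sfx (c : List String) (s : Nat) : c.take (pvBord c s) <:+ c.take s := by
  rcases Nat.eq_zero_or_pos (pvBord c s) with h | h
  · rw [h]; exact List.nil_suffix
  · exact Nat.findGreatest_spec (P := fun j => c.take j <:+ c.take s)
      (Nat.zero_le _) List.nil_suffix

theorem pv_bord_max {c : List String} {s j : Nat} (hj : j ≤ s - 1)
    (h : c.take j <:+ c.take s) : j ≤ pvBord c s :=
  Nat.le_findGreatest hj h

-- the snoc extension law: take (k+1) is a suffix of t ++ [x] iff take k is a
-- suffix of t and c[k] = x
theorem pv_ext {c t : List String} {x : String} {k : Nat} (hk : k < c.length) :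
    (c.take (k+1) <:+ t ++ [x]) ↔ (c.take k <:+ t ∧ c.getD k "" = x) := by
  have hsome : getElem? c k = some (c.getD k "") := by
    rw [List.getElem?_eq_getElem hk, List.getD_eq_getElem c "" hk]
  rw [List.take_add_one, hsome]
  show c.take k ++ [c.getD k ""] <:+ t ++ [x] ↔ _
  rw [← List.reverse_prefix]
  simp only [List.reverse_append, List.reverse_cons, List.reverse_nil, List.nil_append,
    List.singleton_append]
  rw [List.cons_prefix_cons, List.reverse_prefix]
  constructor
  · rintro ⟨h1, h2⟩; exact ⟨h2, h1⟩
  · rintro ⟨h1, h2⟩; exact ⟨h2, h1⟩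

-- congruence for ν on snoc lists: only borders that can absorb x matter
theorem pv_nu_snoc_congr {c t₁ t₂ : List String} {x : String}
    (h : ∀ j, j < c.length → c.getD j "" = x → (c.take j <:+ t₁ ↔ c.take j <:+ t₂)) :
    pvNu c (t₁ ++ [x]) = pvNu c (t₂ ++ [x]) := by
  apply pv_nu_eq_of_iff
  intro k hk
  cases k with
  | zero => simp [List.nil_suffix]
  | succ j =>
    have hj : j < c.length := hk
    rw [pv_ext hj, pv_ext hj]
    constructor
    · rintro ⟨h1, h2⟩; exact ⟨(h j hj h2).mp h1, h2⟩
    · rintro ⟨h1, h2⟩; exact ⟨(h j hj h2).mpr h1, h2⟩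

-- failing fallback: if x does not extend the border chain head s, shrink to bord s
theorem pv_shrink {c : List String} {x : String} {s : Nat} (hs1 : 1 ≤ s)
    (hsm : s ≤ c.length) (hx : x ≠ c.getD s "") :
    pvNu c (c.take s ++ [x]) = pvNu c (c.take (pvBord c s) ++ [x]) := by
  apply pv_nu_snoc_congr
  intro j hj hjx
  constructor
  · intro h
    have hjs : j ≤ s := by
      have := h.length_le
      rw [List.length_take, List.length_take] at this
      omega
    have hlt : j < s := by
      by_contra h''
      have hjs' : j = s := by omega
      exact hx (by rw [← hjx, hjs'])
    have hb : j ≤ pvBord c s := pv_bord_max (by omega) h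
    exact pv_take_suffix_take hb h (pv_bord_sfx c s)
  · intro h
    exact h.trans (pv_bord_sfx c s)

-- ν against a single-element text
theorem pv_nu_single {c : List String} (x : String) (h0 : 0 < c.length) :
    pvNu c [x] = if x = c.getD 0 "" then 1 else 0 := by
  have hiff : (c.take 1 <:+ [x]) ↔ x = c.getD 0 "" := by
    have := pv_ext (c := c) (t := ([] : List String)) (x := x) (k := 0) h0
    simp only [List.nil_append] at this
    rw [this]
    simp [eq_comm]
  unfold pvNu
  have hmin : min c.length ([x] : List String).length = 1 := by
    simp; omega
  rw [hmin, Nat.findGreatest_succ]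
  by_cases hx : x = c.getD 0 ""
  · rw [if_pos (hiff.mpr hx), if_pos hx]
  · rw [if_neg (fun h => hx (hiff.mp h)), if_neg hx]
    rfl

-- the combined while+if step computes ν of (matched border ++ [x])
theorem pv_fall_step {c : List String} {pi : List Nat} (hpi : pvPiOk c pi) :
    ∀ k, k < c.length → k ≤ pi.length → ∀ x,
      pvStep c pi x k = pvNu c (c.take k ++ [x]) := by
  intro k
  induction k using Nat.strong_induction_on with
  | _ k ih =>
    intro hk hkl x
    cases k with
    | zero =>
      show (if x = c.getD (pvFall c pi x 0) "" then pvFall c pi x 0 + 1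
            else pvFall c pi x 0) = pvNu c (c.take 0 ++ [x])
      simp only [pvFall, List.take_zero, List.nil_append]
      rw [pv_nu_single x hk]
      by_cases hx : x = c.getD 0 "" <;> simp [hx]
    | succ s =>
      by_cases hx : x = c.getD (s+1) ""
      · show (if x = c.getD (pvFall c pi x (s+1)) "" then pvFall c pi x (s+1) + 1
              else pvFall c pi x (s+1)) = _
        have hf : pvFall c pi x (s+1) = s+1 := by rw [pvFall, if_pos hx]
        rw [hf, if_pos hx]
        have hsome : getElem? c (s+1) = some (c.getD (s+1) "") := by
          rw [List.getElem?_eq_getElem hk, List.getD_eq_getElem c "" hk]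
        have htake : c.take (s+1) ++ [x] = c.take (s+2) := by
          rw [List.take_add_one (i := s+1), hsome, hx]
          rfl
        rw [htake, pv_nu_take (by omega)]
      · have hb : pi.getD s 0 = pvBord c (s+1) := hpi s (by omega)
        have hble : pvBord c (s+1) ≤ s := by
          have := pv_bord_le c (s+1); omega
        have hfall : pvFall c pi x (s+1) = pvFall c pi x (pvBord c (s+1)) := by
          rw [pvFall, if_neg hx, hb, min_eq_left hble]
        have hstep : pvStep c pi x (s+1) = pvStep c pi x (pvBord c (s+1)) := by
          unfold pvStep
          rw [hfall]
        rw [hstep, ih (pvBord c (s+1)) (by omega) (by omega) (by omega) x,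
          pv_shrink (by omega) (by omega) hx]

-- one automaton transition tracks ν over snoc, including the k = m cap
theorem pv_nu_cap {c t : List String} {x : String} (hm : c ≠ [])
    (h : pvNu c t = c.length) :
    pvNu c (t ++ [x]) = pvNu c (c.take (pvBord c c.length) ++ [x]) := by
  have hml : 1 ≤ c.length := by
    cases c with
    | nil => exact absurd rfl hm
    | cons a l => simp
  have hfull : c.take c.length <:+ t := by
    have := pv_nu_sfx c t; rwa [h] at this
  apply pv_nu_snoc_congr
  intro j hj _
  constructor
  · intro hjt
    have h1 : c.take j <:+ c.take c.length :=
      pv_take_suffix_take (by omega) hjt hfull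
    have h2 : j ≤ pvBord c c.length := pv_bord_max (by omega) h1
    exact pv_take_suffix_take h2 h1 (pv_bord_sfx c c.length)
  · intro hjb
    exact (hjb.trans (pv_bord_sfx c c.length)).trans hfull

theorem pv_nu_nocap {c t : List String} {x : String} (_h : pvNu c t < c.length) :
    pvNu c (t ++ [x]) = pvNu c (c.take (pvNu c t) ++ [x]) := by
  apply pv_nu_snoc_congr
  intro j hj _
  constructor
  · intro hjt
    exact pv_take_suffix_take (pv_nu_max (by omega) hjt) hjt (pv_nu_sfx c t)
  · intro hjb
    exact hjb.trans (pv_nu_sfx c t)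

-- bord (i+1) arises from one automaton step at bord i reading c[i]
theorem pv_bord_step {c : List String} {i : Nat} (hi1 : 1 ≤ i) (him : i < c.length) :
    pvBord c (i + 1) = pvNu c (c.take (pvBord c i) ++ [c.getD i ""]) := by
  set x := c.getD i "" with hxdef
  have hbi : pvBord c i ≤ i - 1 := pv_bord_le c i
  have hsome : getElem? c i = some (c.getD i "") := by
    rw [List.getElem?_eq_getElem him, List.getD_eq_getElem c "" him]
  have htake : c.take i ++ [x] = c.take (i+1) := by
    rw [List.take_add_one (i := i), hsome, hxdef]
    rfl
  apply le_antisymm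
  · -- bord(i+1) ≤ ν
    rcases Nat.eq_zero_or_pos (pvBord c (i+1)) with h0 | hpos
    · omega
    · obtain ⟨j, hj⟩ : ∃ j, pvBord c (i+1) = j + 1 :=
        ⟨pvBord c (i+1) - 1, by omega⟩
      have hble : pvBord c (i+1) ≤ i := by
        have := pv_bord_le c (i+1); omega
      have hsfx : c.take (j+1) <:+ c.take (i+1) := by
        rw [← hj]; exact pv_bord_sfx c (i+1)
      rw [← htake] at hsfx
      have hjlt : j < c.length := by omega
      obtain ⟨h1, h2⟩ := (pv_ext hjlt).mp hsfx
      have hjb : j ≤ pvBord c i := pv_bord_max (by omega) h1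
      have h1' : c.take j <:+ c.take (pvBord c i) :=
        pv_take_suffix_take hjb h1 (pv_bord_sfx c i)
      have : c.take (j+1) <:+ c.take (pvBord c i) ++ [x] :=
        (pv_ext hjlt).mpr ⟨h1', h2⟩
      rw [hj]
      exact pv_nu_max (k := j+1) (by omega) this
  · -- ν ≤ bord(i+1)
    rcases Nat.eq_zero_or_pos (pvNu c (c.take (pvBord c i) ++ [x])) with h0 | hpos
    · omega
    · obtain ⟨j, hj⟩ : ∃ j, pvNu c (c.take (pvBord c i) ++ [x]) = j + 1 :=
        ⟨pvNu c (c.take (pvBord c i) ++ [x]) - 1, by omega⟩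
      have hle : pvNu c (c.take (pvBord c i) ++ [x]) ≤ pvBord c i + 1 := by
        have := pv_nu_le c (c.take (pvBord c i) ++ [x])
        simp [List.length_take] at this
        omega
      have hjlt : j < c.length := by omega
      have hsfx := pv_nu_sfx c (c.take (pvBord c i) ++ [x])
      rw [hj] at hsfx
      obtain ⟨h1, h2⟩ := (pv_ext hjlt).mp hsfx
      have h1' : c.take j <:+ c.take i := h1.trans (pv_bord_sfx c i)
      have : c.take (j+1) <:+ c.take i ++ [x] := (pv_ext hjlt).mpr ⟨h1', h2⟩
      rw [htake] at this
      rw [hj]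
      exact pv_bord_max (s := i+1) (j := j+1) (by omega) this

-- the pi-building loop: every entry it appends is the true border value
theorem pv_piLoop_ok (c : List String) :
    ∀ (n i : Nat) (pi : List Nat) (k : Nat), 1 ≤ i → i + n = c.length →
      pi.length = i → pvPiOk c pi → k = pvBord c i →
      (pvPiLoop c (List.range' i n) (pi, k)).1.length = c.length ∧
        pvPiOk c (pvPiLoop c (List.range' i n) (pi, k)).1 := by
  intro n
  induction n with
  | zero =>
    intro i pi k hi1 hlen hpl hok _
    simp only [List.range']
    exact ⟨by simpa [pvPiLoop] using by omega, by simpa [pvPiLoop] using hok⟩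
  | succ n ih =>
    intro i pi k hi1 hlen hpl hok hk
    rw [List.range'_succ]
    show (pvPiLoop c (i :: List.range' (i+1) n) (pi, k)).1.length = c.length ∧ _
    simp only [pvPiLoop]
    have him : i < c.length := by omega
    have hstep : pvStep c pi (c.getD i "") k = pvBord c (i + 1) := by
      rw [hk, pv_fall_step hok (pvBord c i) (by have := pv_bord_le c i; omega)
        (by have := pv_bord_le c i; omega) (c.getD i ""),
        ← pv_bord_step hi1 him]
    rw [hstep]
    apply ih (i+1) (pi ++ [pvBord c (i+1)]) (pvBord c (i+1)) (by omega) (by omega)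
      (by simp [hpl])
    · intro j hj
      simp [hpl] at hj
      rcases Nat.lt_or_ge j i with h' | h'
      · rw [List.getD_append _ _ _ _ (by omega)]
        exact hok j (by omega)
      · have hji : j = i := by omega
        subst hji
        rw [List.getD_eq_getElem _ _ (by simp [hpl])]
        simp [hpl]
    · rfl

-- the scan loop tracks ν of the consumed part of previous_lines
theorem pv_scanLoop_nu {c : List String} {pi : List Nat} (hc : c ≠ [])
    (hpl : pi.length = c.length) (hok : pvPiOk c pi) :
    ∀ (rest t : List String) (k : Nat), k = pvNu c t →
      pvScanLoop c pi c.length rest k = pvNu c (t ++ rest) := by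
  intro rest
  induction rest with
  | nil => intro t k hk; simpa [pvScanLoop] using hk
  | cons x rest ih =>
    intro t k hk
    have hml : 1 ≤ c.length := by
      cases c with
      | nil => exact absurd rfl hc
      | cons a l => simp
    show pvScanLoop c pi c.length rest
        (pvStep c pi x (if k = c.length then pi.getD (c.length - 1) 0 else k))
        = pvNu c (t ++ x :: rest)
    have hnu : pvStep c pi x (if k = c.length then pi.getD (c.length - 1) 0 else k)
        = pvNu c (t ++ [x]) := by
      by_cases hcap : k = c.length
      · rw [if_pos hcap]
        have hb : pi.getD (c.length - 1) 0 = pvBord c c.length := by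
          have := hok (c.length - 1) (by omega)
          rwa [show c.length - 1 + 1 = c.length by omega] at this
        rw [hb, pv_fall_step hok (pvBord c c.length)
          (by have := pv_bord_le c c.length; omega)
          (by have := pv_bord_le c c.length; omega) x]
        rw [← pv_nu_cap (t := t) (x := x) hc (by omega)]
      · rw [if_neg hcap]
        have hklt : k < c.length := by
          have := pv_nu_le c t
          rw [← hk] at this
          rcases Nat.lt_or_ge k c.length with h' | h'
          · exact h'
          · exfalso; apply hcap; omega
        rw [pv_fall_step hok k hklt (by omega) x, hk,
          ← pv_nu_nocap (t := t) (x := x) (by omega)]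
    rw [ih (t ++ [x]) _ hnu, List.append_assoc]
    rfl

-- ===== A-side characterization (reference descending scan) =====
def pvRef (p c : List String) : Nat → List String
  | 0 => c
  | o + 1 =>
    if p.drop (p.length - (o + 1)) = c.take (o + 1) then c.drop (o + 1) else pvRef p c o

theorem pvAGo_eq_ref (p c : List String) (o : Nat) :
    pvAGo p c (PySem.List.pyRange (o : Int) (-1) (-1)) = pvRef p c o := by
  induction o with
  | zero =>
    rw [PySem.List.pyRange_neg_one_cons (by norm_num)]
    simp [pvAGo, pvRef]
  | succ o ih =>
    rw [PySem.List.pyRange_neg_one_cons (by omega)]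
    show pvAGo p c (((o + 1 : Nat) : Int) :: PySem.List.pyRange ((o + 1 : Nat) - 1) (-1) (-1)) = _
    have hstep : ((o + 1 : Nat) : Int) - 1 = (o : Int) := by push_cast; ring
    rw [hstep]
    unfold pvAGo
    have hne : ¬ ((o + 1 : Nat) : Int) = 0 := by omega
    rw [if_neg hne]
    have hs1 : PySem.List.slice p (some (-((o + 1 : Nat) : Int))) none
        = p.drop (p.length - (o + 1)) :=
      PySem.List.slice_from_neg_natCast p (o + 1) (by omega)
    have hs2 : PySem.List.slice c none (some ((o + 1 : Nat) : Int)) = c.take (o + 1) :=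
      PySem.List.slice_to_natCast c (o + 1)
    have hs3 : PySem.List.slice c (some ((o + 1 : Nat) : Int)) none = c.drop (o + 1) :=
      PySem.List.slice_from_natCast c (o + 1)
    rw [hs1, hs2, hs3, ih]
    rfl

theorem pvRef_findGreatest (p c : List String) (o : Nat) :
    pvRef p c o
      = c.drop (Nat.findGreatest (fun k => p.drop (p.length - k) = c.take k) o) := by
  induction o with
  | zero => simp [pvRef]
  | succ o ih =>
    rw [Nat.findGreatest_succ]
    show (if p.drop (p.length - (o + 1)) = c.take (o + 1) then c.drop (o + 1)
          else pvRef p c o) = _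
    by_cases h : p.drop (p.length - (o + 1)) = c.take (o + 1)
    · rw [if_pos h, if_pos h]
    · rw [if_neg h, if_neg h, ih]

-- A's first-hit descending scan finds exactly ν c p
theorem pv_findGreatest_eq_nu (p c : List String) :
    Nat.findGreatest (fun k => p.drop (p.length - k) = c.take k)
      (min p.length c.length) = pvNu c p := by
  set P := fun k => p.drop (p.length - k) = c.take k with hP
  have hP0 : P 0 := by simp [hP]
  apply le_antisymm
  · set G := Nat.findGreatest P (min p.length c.length) with hG
    have hGle : G ≤ min p.length c.length := Nat.findGreatest_le _
    have hPG : P G := by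
      rcases Nat.eq_zero_or_pos G with h | h
      · rw [h]; exact hP0
      · exact Nat.findGreatest_spec (Nat.zero_le _) hP0
    have : c.take G <:+ p := by
      rw [← hPG]
      exact List.drop_suffix _ _
    exact pv_nu_max (by omega) this
  · have hle : pvNu c p ≤ min p.length c.length := by
      have := pv_nu_le c p; omega
    refine Nat.le_findGreatest hle ?_
    have hsfx := pv_nu_sfx c p
    obtain ⟨u, hu⟩ := hsfx
    have hlen : (c.take (pvNu c p)).length = pvNu c p := by
      simp [List.length_take]
      omega
    have hul : u.length = p.length - pvNu c p := by
      have := congrArg List.length hu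
      simp at this
      omega
    show p.drop (p.length - pvNu c p) = c.take (pvNu c p)
    rw [← hul]
    calc p.drop u.length = (u ++ c.take (pvNu c p)).drop u.length := by rw [hu]
      _ = c.take (pvNu c p) := by simp

theorem pv_A_drop (p c : List String) :
    find_new_lines_py p c = c.drop (pvNu c p) := by
  unfold find_new_lines_py
  by_cases hp : p = []
  · subst hp
    have : pvNu c [] = 0 := by
      have h1 := pv_nu_le c ([] : List String)
      simpa using h1
    simp [this]
  · rw [if_neg hp]
    have hmin : min ((p.length : Nat) : Int) ((c.length : Nat) : Int)
        = ((min p.length c.length : Nat) : Int) := by push_cast; rfl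
    show pvAGo p c (PySem.List.pyRange
        (min ((p.length : Nat) : Int) ((c.length : Nat) : Int)) (-1) (-1)) = _
    rw [hmin, pvAGo_eq_ref p c (min p.length c.length), pvRef_findGreatest,
      pv_findGreatest_eq_nu]

theorem pv_B_drop (p c : List String) :
    find_new_lines_py_alt p c = c.drop (pvNu c p) := by
  unfold find_new_lines_py_alt
  by_cases hc : c = []
  · subst hc
    simp
  · rw [if_neg hc]
    have hml : 1 ≤ c.length := by
      cases c with
      | nil => exact absurd rfl hc
      | cons a l => simp
    have hok0 : pvPiOk c [0] := by
      intro j hj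
      simp at hj
      subst hj
      show (0 : Nat) = pvBord c 1
      simp [pvBord]
    have hb1 : (0 : Nat) = pvBord c 1 := by simp [pvBord]
    obtain ⟨hlen, hok⟩ := pv_piLoop_ok c (c.length - 1) 1 [0] 0 le_rfl (by omega)
      rfl hok0 hb1
    have hnu0 : (0 : Nat) = pvNu c [] := by
      have h1 := pv_nu_le c ([] : List String)
      simp at h1
      omega
    have := pv_scanLoop_nu hc hlen hok p [] 0 hnu0
    simp only [List.nil_append] at this
    show c.drop (pvScanLoop c ((pvPiLoop c (List.range' 1 (c.length - 1)) ([0], 0)).1)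
      c.length p 0) = c.drop (pvNu c p)
    rw [this]

-- ===== VERDICT (by name: the statement is the Claim_ definition above) =====
theorem find_new_lines_py_spec : Claim_equal_find_new_lines_py := by
  intro p c _
  show find_new_lines_py p c = find_new_lines_py_alt p c
  rw [pv_A_drop, pv_B_drop]
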